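-- pv_equiv track=rewrite | github.com/jiangzf93/od-solution-python | C_5_sushi/solution.py | solve
-- ===== SOURCE A (Python) =====
-- def solve(inputStr):
--     sushis = inputStr.split()
--     cycleSushis = [int(sushi) for sushi in sushis] * 2
--     addedSushis = [0] * len(cycleSushis)
--     sushiStack = []
--     for s in range(len(cycleSushis)):
--         currSushi = cycleSushis[s]
--         while(sushiStack and cycleSushis[sushiStack[-1]] > currSushi):
--             sushiIndex = sushiStack.pop()
--             addedSushis[sushiIndex] = cycleSushis[sushiIndex] + cycleSushis[s]
--         sushiStack.append(s)
--     while sushiStack: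
--         sushiIndex = sushiStack.pop()
--         addedSushis[sushiIndex] = cycleSushis[sushiIndex]
--     return ' '.join([str(s) for s in addedSushis[:len(sushis)]])
-- ===== SOURCE B (Python) =====
-- def solve(inputStr):
--     vals = [int(t) for t in inputStr.split()]
--     n = len(vals)
--     res = []
--     for i in range(n):
--         out = vals[i]
--         for k in range(1, n):
--             other = vals[(i + k) % n]
--             if other < vals[i]:
--                 out = vals[i] + other
--                 break
--         res.append(out)
--     return ' '.join(str(x) for x in res)
-- ===== Notes on version B (the rewrite author's own statement) =====
-- stated objective: simpler
-- what changed: Replaced the doubled-array monotonic-stack next-smaller computation with a direct per-index circular scan using modular indexing (no doubled array, no stack, no deferred fill-in).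
import Mathlib
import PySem

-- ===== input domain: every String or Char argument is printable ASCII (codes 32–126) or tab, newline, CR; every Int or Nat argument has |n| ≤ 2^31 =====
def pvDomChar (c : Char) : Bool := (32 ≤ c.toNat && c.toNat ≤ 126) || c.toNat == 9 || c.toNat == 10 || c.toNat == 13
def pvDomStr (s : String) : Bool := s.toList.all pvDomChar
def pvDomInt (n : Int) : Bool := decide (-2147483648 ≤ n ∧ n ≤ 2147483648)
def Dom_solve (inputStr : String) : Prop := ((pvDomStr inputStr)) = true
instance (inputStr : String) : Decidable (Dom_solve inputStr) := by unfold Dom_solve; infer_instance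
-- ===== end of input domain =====

-- B replaces A's doubled-array monotonic stack with a direct per-index circular scan
-- (modular indexing) for the first strictly smaller element (objective: simpler).

-- ===== PORT A =====
-- inner 'while sushiStack and cycleSushis[sushiStack[-1]] > currSushi' loop
-- (the stack is kept head-first: head = Python's stack[-1])
def drainA (c : List Int) (cur : Int) : List Nat → List Int → List Nat × List Int
  | [], added => ([], added)
  | t :: rest, added =>
    if c.getD t 0 > cur then drainA c cur rest (added.set t (c.getD t 0 + cur))
    else (t :: rest, added)

-- body of 'for s in range(len(cycleSushis))'
def stepA (c : List Int) (p : List Int × List Nat) (s : Nat) : List Int × List Nat :=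
  let q := drainA c (c.getD s 0) p.2 p.1
  (q.2, s :: q.1)

def solve (inputStr : String) : String :=
  let sushis := PySem.Str.split₀ inputStr
  let cycleSushis := PySem.List.pyRepeat (sushis.map (fun t => (PySem.Int.ofStr? t).getD 0)) 2
  let addedSushis : List Int := List.replicate cycleSushis.length 0
  let st := (List.range cycleSushis.length).foldl (stepA cycleSushis) (addedSushis, [])
  -- final 'while sushiStack' drain (head of st.2 = Python's stack top, popped first)
  let final := st.2.foldl (fun (ad : List Int) t => ad.set t (cycleSushis.getD t 0)) st.1
  PySem.Str.join " " ((PySem.List.slice final none (some ((sushis.length : Int)))).map PySem.Int.toStr)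

-- ===== PORT B =====
def solve_alt (inputStr : String) : String :=
  let vals := (PySem.Str.split₀ inputStr).map (fun t => (PySem.Int.ofStr? t).getD 0)
  let n := vals.length
  let res := (List.range n).map (fun i =>
    -- 'for k in range(1, n): if vals[(i + k) % n] < vals[i]: out = vals[i] + …; break'
    match (List.range' 1 (n - 1)).find? (fun k => decide (vals.getD ((i + k) % n) 0 < vals.getD i 0)) with
    | some k => vals.getD i 0 + vals.getD ((i + k) % n) 0
    | none => vals.getD i 0)
  PySem.Str.join " " (res.map PySem.Int.toStr)

-- ===== PRECONDITION & SPEC =====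
-- Pre_ excludes exactly the inputs where int(token) raises ValueError in Python A.
def Pre_solve (inputStr : String) : Prop :=
  ∀ t ∈ PySem.Str.split₀ inputStr, (PySem.Int.ofStr? t).isSome
instance (inputStr : String) : Decidable (Pre_solve inputStr) := by unfold Pre_solve; infer_instance
def pvWitness_solve : String := "3 1 2"

def Spec_solve (inputStr : String) (out : String) : Prop := out = solve_alt inputStr
instance (inputStr : String) (out : String) : Decidable (Spec_solve inputStr out) := by unfold Spec_solve; infer_instance

-- ===== CLAIM (what is proved, stated in full; the proofs are below) =====
def Claim_equal_solve : Prop := ∀ (inputStr : String), Dom_solve inputStr → Pre_solve inputStr → Spec_solve inputStr (solve inputStr)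

-- ===== LEMMAS AND PROOFS =====
def specNS (c : List Int) (s i : Nat) : Option Nat :=
  (List.range' (i + 1) (s - (i + 1))).find? (fun j => decide (c.getD j 0 < c.getD i 0))

lemma range'_to_succ (a m : Nat) : List.range' a (m + 1) = List.range' a m ++ [a + m] := by
  simpa using List.range'_concat (s := a) (n := m) (step := 1)

lemma specNS_ge (c : List Int) (s i : Nat) (hi : s ≤ i + 1) : specNS c s i = none := by
  simp [specNS, Nat.sub_eq_zero_of_le hi]

lemma specNS_succ (c : List Int) (s i : Nat) (hi : i < s) :
    specNS c (s + 1) i =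
      (specNS c s i).or (if c.getD s 0 < c.getD i 0 then some s else none) := by
  have h1 : s + 1 - (i + 1) = (s - (i + 1)) + 1 := by omega
  have h3 : i + 1 + (s - (i + 1)) = s := by omega
  rw [specNS, h1, range'_to_succ, h3, List.find?_append, specNS]
  congr 1
  simp [List.find?]
  split <;> simp_all

def stackSpec (c : List Int) (s : Nat) : List Nat :=
  ((List.range s).filter (fun i => (specNS c s i).isNone)).reverse

lemma mem_stackSpec {c : List Int} {s i : Nat} :
    i ∈ stackSpec c s ↔ i < s ∧ specNS c s i = none := by
  simp [stackSpec, Option.isNone_iff_eq_none]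

lemma stackSpec_pairwise (c : List Int) (s : Nat) :
    (stackSpec c s).Pairwise (fun a b => c.getD b 0 ≤ c.getD a 0) := by
  rw [stackSpec, List.pairwise_reverse]
  have hp : ((List.range s).filter (fun i => (specNS c s i).isNone)).Pairwise (· < ·) :=
    (List.pairwise_lt_range).filter _
  refine hp.imp_of_mem ?_
  intro a b ha hb hab
  have ha' : specNS c s a = none := by
    have := (List.mem_filter.mp ha).2
    simpa [Option.isNone_iff_eq_none] using this
  have hb' : b < s := by
    have := (List.mem_filter.mp hb).1
    simpa using this
  have hbmem : b ∈ List.range' (a + 1) (s - (a + 1)) := by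
    rw [List.mem_range'_1]
    omega
  have := List.find?_eq_none.mp ha' b hbmem
  simpa using this

lemma drainA_eq (c : List Int) (cur : Int) :
    ∀ (st : List Nat) (ad : List Int),
      st.Pairwise (fun a b => c.getD b 0 ≤ c.getD a 0) →
      drainA c cur st ad =
        (st.filter (fun t => !decide (cur < c.getD t 0)),
         (st.filter (fun t => decide (cur < c.getD t 0))).foldl
           (fun a t => a.set t (c.getD t 0 + cur)) ad) := by
  intro st
  induction st with
  | nil => intro ad _; simp [drainA]
  | cons t rest ih =>
    intro ad hpw
    rw [drainA]
    by_cases h : cur < c.getD t 0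
    · rw [if_pos (by exact h)]
      rw [ih _ hpw.of_cons]
      simp only [List.filter_cons]
      have hd : (decide (cur < c.getD t 0)) = true := by simpa using h
      rw [hd]
      simp [List.foldl_cons]
    · rw [if_neg (by exact h)]
      have hall : ∀ b ∈ rest, ¬ (cur < c.getD b 0) := by
        intro b hb
        have := (List.pairwise_cons.mp hpw).1 b hb
        omega
      have h1 : (t :: rest).filter (fun t => !decide (cur < c.getD t 0)) = t :: rest := by
        simp only [List.filter_cons, h]
        simp only [decide_false, Bool.not_false, if_true]
        rw [List.filter_eq_self.mpr]
        intro b hb; simpa using hall b hb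
      have h2 : (t :: rest).filter (fun t => decide (cur < c.getD t 0)) = [] := by
        rw [List.filter_eq_nil_iff]
        intro b hb
        rcases List.mem_cons.mp hb with rfl | hb
        · simpa using h
        · simpa using hall b hb
      rw [h1, h2]
      simp

lemma length_foldl_set (f : Nat → Int) :
    ∀ (l : List Nat) (ad : List Int),
      (l.foldl (fun a t => a.set t (f t)) ad).length = ad.length := by
  intro l
  induction l with
  | nil => intro ad; rfl
  | cons t l ih => intro ad; simp [List.foldl_cons, ih]

lemma foldl_set_getD (f : Nat → Int) :
    ∀ (l : List Nat) (ad : List Int) (j : Nat), j < ad.length →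
      (l.foldl (fun a t => a.set t (f t)) ad).getD j 0 =
        if j ∈ l then f j else ad.getD j 0 := by
  intro l
  induction l with
  | nil => intro ad j hj; simp
  | cons t l ih =>
    intro ad j hj
    rw [List.foldl_cons, ih _ j (by simpa using hj)]
    by_cases hjl : j ∈ l
    · simp [hjl]
    · by_cases hjt : j = t
      · subst hjt
        simp [hjl, List.getD_eq_getElem?_getD, List.getElem?_set_self (by omega)]
      · simp [hjl, hjt, List.getD_eq_getElem?_getD, List.getElem?_set_ne (fun h => hjt h.symm)]

lemma stackSpec_succ (c : List Int) (s : Nat) :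
    stackSpec c (s + 1) =
      s :: (stackSpec c s).filter (fun t => !decide (c.getD s 0 < c.getD t 0)) := by
  have hq : ∀ i ∈ List.range s, ((specNS c (s+1) i).isNone) =
      ((!decide (c.getD s 0 < c.getD i 0)) && (specNS c s i).isNone) := by
    intro i hi
    rw [specNS_succ c s i (List.mem_range.mp hi)]
    cases h0 : specNS c s i
    · simp only [Option.none_or]
      split <;> simp_all
    · simp
  have hs1 : (specNS c (s+1) s).isNone = true := by rw [specNS_ge c (s+1) s le_rfl]; rfl
  conv_lhs => rw [stackSpec, List.range_succ, List.filter_append, List.filter_congr hq]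
  conv_rhs => rw [stackSpec, List.filter_reverse, List.filter_filter]
  simp [hs1]

def addedSpec (c : List Int) (s i : Nat) : Int :=
  match specNS c s i with
  | some j => c.getD i 0 + c.getD j 0
  | none => 0

lemma loop_inv (c : List Int) (s : Nat) (hs : s ≤ c.length) :
    (List.range s).foldl (stepA c) (List.replicate c.length 0, []) =
      ((List.range c.length).map (addedSpec c s), stackSpec c s) := by
  induction s with
  | zero =>
    refine Prod.ext ?_ ?_
    · apply List.ext_getElem
      · simp
      · intro j h1 h2
        rw [← List.getD_eq_getElem _ 0 h1, ← List.getD_eq_getElem _ 0 h2,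
          PySem.List.getD_map_range _ _ _ _ (by simpa using h2)]
        simp [addedSpec, specNS_ge c 0 j (by omega)]
    · simp [stackSpec]
  | succ s ih =>
    rw [List.range_succ, List.foldl_append, ih (by omega), List.foldl_cons, List.foldl_nil,
      stepA, drainA_eq c _ _ _ (stackSpec_pairwise c s)]
    refine Prod.ext ?_ ?_
    · show (((stackSpec c s).filter _).foldl _ _) = _
      apply List.ext_getElem
      · rw [length_foldl_set]; simp
      · intro j h1 h2
        have hjm : j < c.length := by
          rw [length_foldl_set] at h1; simpa using h1
        rw [← List.getD_eq_getElem _ 0 h1, ← List.getD_eq_getElem _ 0 h2,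
          PySem.List.getD_map_range _ _ _ _ (by simpa using hjm),
          foldl_set_getD _ _ _ _ (by simpa using hjm),
          PySem.List.getD_map_range _ _ _ _ (by simpa using hjm)]
        by_cases hjs : j < s
        · cases h0 : specNS c s j with
          | some j' =>
            have hnm : j ∉ (stackSpec c s).filter (fun t => decide (c.getD s 0 < c.getD t 0)) := by
              intro hmem
              have := (mem_stackSpec.mp (List.mem_filter.mp hmem).1).2
              simp [this] at h0
            rw [if_neg hnm, addedSpec, addedSpec, specNS_succ c s j hjs, h0]
            rfl
          | none =>
            by_cases hlt : c.getD s 0 < c.getD j 0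
            · have hm : j ∈ (stackSpec c s).filter (fun t => decide (c.getD s 0 < c.getD t 0)) := by
                rw [List.mem_filter]
                exact ⟨mem_stackSpec.mpr ⟨hjs, h0⟩, by simpa using hlt⟩
              rw [if_pos hm, addedSpec, specNS_succ c s j hjs, h0, if_pos hlt]
              rfl
            · have hnm : j ∉ (stackSpec c s).filter (fun t => decide (c.getD s 0 < c.getD t 0)) := by
                intro hmem
                exact hlt (by simpa using (List.mem_filter.mp hmem).2)
              rw [if_neg hnm, addedSpec, addedSpec, specNS_succ c s j hjs, h0, if_neg hlt]
              rfl
        · have hnm : j ∉ (stackSpec c s).filter (fun t => decide (c.getD s 0 < c.getD t 0)) := by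
            intro hmem
            exact hjs (mem_stackSpec.mp (List.mem_filter.mp hmem).1).1
          rw [if_neg hnm, addedSpec, addedSpec, specNS_ge c s j (by omega),
            specNS_ge c (s+1) j (by omega)]
    · show (s :: (stackSpec c s).filter _) = _
      rw [stackSpec_succ]

def resA (c : List Int) (i : Nat) : Int :=
  match specNS c c.length i with
  | some j => c.getD i 0 + c.getD j 0
  | none => c.getD i 0

lemma final_eq (c : List Int) :
    (stackSpec c c.length).foldl (fun (ad : List Int) t => ad.set t (c.getD t 0))
        ((List.range c.length).map (addedSpec c c.length)) =
      (List.range c.length).map (resA c) := by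
  apply List.ext_getElem
  · rw [length_foldl_set]; simp
  · intro j h1 h2
    have hjm : j < c.length := by rw [length_foldl_set] at h1; simpa using h1
    rw [← List.getD_eq_getElem _ 0 h1, ← List.getD_eq_getElem _ 0 h2,
      PySem.List.getD_map_range _ _ _ _ hjm,
      foldl_set_getD _ _ _ _ (by simpa using hjm),
      PySem.List.getD_map_range _ _ _ _ hjm]
    by_cases hmem : j ∈ stackSpec c c.length
    · rw [if_pos hmem, resA, (mem_stackSpec.mp hmem).2]
    · rw [if_neg hmem, addedSpec, resA]
      cases h0 : specNS c c.length j with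
      | some j' => rfl
      | none => exact absurd (mem_stackSpec.mpr ⟨hjm, h0⟩) hmem

-- find? congruence on members (not in Mathlib under this form)
lemma find?_congr_mem {α : Type} (l : List α) (p q : α → Bool)
    (h : ∀ a ∈ l, p a = q a) : l.find? p = l.find? q := by
  induction l with
  | nil => rfl
  | cons a l ih =>
    rw [List.find?_cons, List.find?_cons, h a List.mem_cons_self]
    cases q a
    · exact ih fun b hb => h b (List.mem_cons_of_mem _ hb)
    · rfl

lemma bridge (vals : List Int) (i : Nat) (hi : i < vals.length) :
    resA (vals ++ vals) i =
      match (List.range' 1 (vals.length - 1)).find?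
          (fun k => decide (vals.getD ((i + k) % vals.length) 0 < vals.getD i 0)) with
      | some k => vals.getD i 0 + vals.getD ((i + k) % vals.length) 0
      | none => vals.getD i 0 := by
  set n := vals.length with hn
  have hlen : (vals ++ vals).length = n + n := by simp [hn]
  have cgetD : ∀ j, j < n + n → (vals ++ vals).getD j 0 = vals.getD (j % n) 0 := by
    intro j hj
    by_cases hjn : j < n
    · rw [List.getD_append _ _ _ _ (by omega), Nat.mod_eq_of_lt hjn]
    · rw [List.getD_append_right _ _ _ _ (by omega),
        Nat.mod_eq_sub_mod (by omega), Nat.mod_eq_of_lt (by omega)]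
  have cgi : (vals ++ vals).getD i 0 = vals.getD i 0 := by
    rw [cgetD i (by omega), Nat.mod_eq_of_lt hi]
  have hsplit : List.range' (i+1) ((n+n) - (i+1)) =
      List.range' (i+1) (n-1) ++ List.range' (i+n) (n-i) := by
    have h2 : (i+1) + 1 * (n-1) = i + n := by omega
    have h3 := List.range'_append (s := i+1) (m := n-1) (n := n-i) (step := 1)
    rw [h2] at h3
    have hc : (n+n) - (i+1) = (n-1) + (n-i) := by omega
    rw [hc]
    exact h3.symm
  have hmap : List.range' (i+1) (n-1) = (List.range' 1 (n-1)).map (fun k => i + k) := by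
    have := List.map_add_range' (a := i) (s := 1) (n := n-1) (step := 1)
    simpa using this.symm
  have hpredeq : ∀ k ∈ List.range' 1 (n-1),
      ((fun j => decide ((vals ++ vals).getD j 0 < (vals ++ vals).getD i 0)) ∘ (fun k => i + k)) k
        = (fun k => decide (vals.getD ((i + k) % n) 0 < vals.getD i 0)) k := by
    intro k hk
    rw [List.mem_range'_1] at hk
    simp only [Function.comp]
    rw [cgetD (i+k) (by omega), cgi]
  rw [resA, specNS, hlen, hsplit, List.find?_append, hmap, List.find?_map,
    find?_congr_mem _ _ _ hpredeq]
  cases hfind : (List.range' 1 (n-1)).find?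
      (fun k => decide (vals.getD ((i + k) % n) 0 < vals.getD i 0)) with
  | some k =>
    have hk : k ∈ List.range' 1 (n-1) := List.mem_of_find?_eq_some hfind
    rw [List.mem_range'_1] at hk
    simp only [Option.map_some, Option.some_or]
    rw [cgetD (i+k) (by omega), cgi]
  | none =>
    have hsecond : (List.range' (i+n) (n-i)).find?
        (fun j => decide ((vals ++ vals).getD j 0 < (vals ++ vals).getD i 0)) = none := by
      rw [List.find?_eq_none]
      intro j hj
      rw [List.mem_range'_1] at hj
      simp only [decide_eq_true_eq, not_lt]
      rw [cgetD j (by omega), cgi]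
      by_cases hje : j = i + n
      · subst hje
        rw [Nat.add_mod_right, Nat.mod_eq_of_lt hi]
      · have hk1 : 1 ≤ j - n - i := by omega
        have hk2 : j - n - i < 1 + (n-1) := by omega
        have hq := List.find?_eq_none.mp hfind (j - n - i) (List.mem_range'_1.mpr ⟨hk1, hk2⟩)
        simp only [decide_eq_true_eq, not_lt] at hq
        have hjn : i + (j - n - i) = j - n := by omega
        rw [hjn, Nat.mod_eq_of_lt (by omega)] at hq
        rw [Nat.mod_eq_sub_mod (by omega), Nat.mod_eq_of_lt (by omega)]
        exact hq
    simp only [Option.map_none, Option.none_or, hsecond]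
    exact cgi

lemma core (vals : List Int) :
    (((List.range (vals ++ vals).length).foldl (stepA (vals ++ vals))
        (List.replicate (vals ++ vals).length 0, [])).2.foldl
      (fun (ad : List Int) t => ad.set t ((vals ++ vals).getD t 0))
      (((List.range (vals ++ vals).length).foldl (stepA (vals ++ vals))
        (List.replicate (vals ++ vals).length 0, [])).1)).take vals.length =
    (List.range vals.length).map (fun i =>
      match (List.range' 1 (vals.length - 1)).find?
          (fun k => decide (vals.getD ((i + k) % vals.length) 0 < vals.getD i 0)) with
      | some k => vals.getD i 0 + vals.getD ((i + k) % vals.length) 0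
      | none => vals.getD i 0) := by
  rw [loop_inv (vals ++ vals) (vals ++ vals).length le_rfl]
  rw [show (((List.range (vals ++ vals).length).map (addedSpec (vals ++ vals) (vals ++ vals).length),
      stackSpec (vals ++ vals) (vals ++ vals).length)).2 = stackSpec (vals ++ vals) (vals ++ vals).length from rfl]
  rw [show (((List.range (vals ++ vals).length).map (addedSpec (vals ++ vals) (vals ++ vals).length),
      stackSpec (vals ++ vals) (vals ++ vals).length)).1 = (List.range (vals ++ vals).length).map (addedSpec (vals ++ vals) (vals ++ vals).length) from rfl]
  rw [final_eq (vals ++ vals), ← List.map_take, List.length_append, List.take_range,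
    Nat.min_eq_left (by omega)]
  refine List.map_congr_left ?_
  intro i hi
  exact bridge vals i (List.mem_range.mp hi)

-- ===== VERDICT (by name: the statement is the Claim_ definition above) =====
theorem solve_spec : Claim_equal_solve := by
  intro inputStr _ _
  show solve inputStr = solve_alt inputStr
  rw [solve, solve_alt]
  have hrep : ∀ xs : List Int, PySem.List.pyRepeat xs 2 = xs ++ xs := by
    intro xs; simp [PySem.List.pyRepeat]
  simp only [hrep]
  congr 1
  congr 1
  rw [PySem.List.slice_to_natCast]
  rw [show (PySem.Str.split₀ inputStr).length =
    ((PySem.Str.split₀ inputStr).map (fun t => (PySem.Int.ofStr? t).getD 0)).length by simp]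
  exact core _
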